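-- pv_equiv track=rewrite | github.com/gabriel4649/JMdictDB | python/lib/db.py | rowdiff
-- ===== SOURCE A (Python) =====
-- def rowdiff (a, b, raise_missing=False):
--         diff = {}; amissing = set(); bmissing = set()
--         for k,v in a.items():
--             if k not in b: bmissing.add (k)
--             else:
--                 if b[k] != v: diff[k] = (v,b[k])
--         for k,v in b.items():
--             if k not in a: amissing.add (k)
--         if raise_missing and (amissing or bmissing):
--             raise KeyError ((amissing, bmissing))
--         if raise_missing: return diff
--         return diff, amissing, bmissing
-- ===== SOURCE B (Python) =====
-- def rowdiff(a, b, raise_missing=False):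
--     # Single pass over a: pop matched keys out of a working copy of b.
--     # What remains in the working copy at the end is exactly amissing.
--     pending = dict(b)
--     diff = {}
--     bmissing = set()
--     for k, v in a.items():
--         if k in pending:
--             w = pending.pop(k)
--             if w != v:
--                 diff[k] = (v, w)
--         else:
--             bmissing.add(k)
--     amissing = set(pending)
--     if raise_missing and (amissing or bmissing):
--         raise KeyError((amissing, bmissing))
--     if raise_missing:
--         return diff
--     return diff, amissing, bmissing
-- ===== Notes on version B (the rewrite author's own statement) =====
-- stated objective: alternative
-- what changed: B makes a single destructive pass over a, popping each matched key out of a shrinking working copy of b, so A's entire second loop over b (with its membership test against a) disappears and amissing is read off as the leftover keys of the residual dict.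
-- outside the precondition, e.g. on rowdiff({'x': 1}, {'x': 1}, True): A returns {}, B returns {}; on rowdiff({'x': 1}, {}, True): A raises KeyError, B raises KeyError
import Mathlib
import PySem

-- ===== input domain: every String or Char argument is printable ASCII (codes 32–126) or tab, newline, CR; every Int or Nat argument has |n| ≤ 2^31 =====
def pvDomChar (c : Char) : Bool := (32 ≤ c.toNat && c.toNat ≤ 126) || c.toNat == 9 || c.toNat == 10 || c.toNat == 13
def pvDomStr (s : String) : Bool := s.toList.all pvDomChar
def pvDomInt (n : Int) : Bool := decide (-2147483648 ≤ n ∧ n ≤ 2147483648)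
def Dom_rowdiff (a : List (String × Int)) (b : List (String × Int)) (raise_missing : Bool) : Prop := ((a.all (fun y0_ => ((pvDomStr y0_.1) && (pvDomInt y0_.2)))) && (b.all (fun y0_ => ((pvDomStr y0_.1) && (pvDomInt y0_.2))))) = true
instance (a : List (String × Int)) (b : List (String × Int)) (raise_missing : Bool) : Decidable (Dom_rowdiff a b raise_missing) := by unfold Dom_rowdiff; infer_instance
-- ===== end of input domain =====

-- B replaces A's two membership-testing loops by ONE destructive pass over a that pops each
-- matched key out of a shrinking working copy of b; amissing is the residual dict's key set
-- (objective: alternative decomposition, same asymptotic cost).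

-- ===== PORT A =====
-- Faithful port of A. The dict arguments arrive as association lists and are read through
-- PySem.Dict.ofList (Python dict construction). A's `raise KeyError` branch and its
-- `return diff` (a lone dict, not the triple) branch are only reachable with
-- raise_missing = True, which Pre_rowdiff excludes; the port returns the triple state.
def rowdiff (a : List (String × Int)) (b : List (String × Int)) (raise_missing : Bool) : (List (String × Int × Int)) × List String × List String :=
  let da := PySem.Dict.ofList a
  let db := PySem.Dict.ofList b
  -- for k,v in a.items(): if k not in b: bmissing.add(k) else: if b[k] != v: diff[k] = (v, b[k])
  let st := da.items.foldl
    (fun (st : PySem.Dict String (Int × Int) × PySem.Set String) kv =>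
      if db.contains kv.1 then
        (if db.getD kv.1 0 ≠ kv.2 then (st.1.insert kv.1 (kv.2, db.getD kv.1 0), st.2) else st)
      else (st.1, PySem.Set.add st.2 kv.1))
    (PySem.Dict.empty, PySem.Set.empty)
  -- for k,v in b.items(): if k not in a: amissing.add(k)
  let amissing := db.items.foldl
    (fun (m : PySem.Set String) kv => if !(da.contains kv.1) then PySem.Set.add m kv.1 else m)
    PySem.Set.empty
  (st.1.items, amissing, st.2)

-- ===== PORT B =====
-- Port of Source B: `pending = dict(b)`; one loop over a's items that pops matched keys from
-- pending (`if k in pending: w = pending.pop(k)` becomes the pop? match); finally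
-- `amissing = set(pending)` is the set of the residual dict's keys.
def rowdiff_alt (a : List (String × Int)) (b : List (String × Int)) (raise_missing : Bool) : (List (String × Int × Int)) × List String × List String :=
  let da := PySem.Dict.ofList a
  let st := da.items.foldl
    (fun (st : PySem.Dict String Int × PySem.Dict String (Int × Int) × PySem.Set String) kv =>
      match st.1.pop? kv.1 with
      | some (w, p') =>
          if w ≠ kv.2 then (p', st.2.1.insert kv.1 (kv.2, w), st.2.2) else (p', st.2.1, st.2.2)
      | none => (st.1, st.2.1, PySem.Set.add st.2.2 kv.1))
    (PySem.Dict.ofList b, PySem.Dict.empty, PySem.Set.empty)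
  let amissing := PySem.Set.ofList st.1.keys
  (st.2.1.items, amissing, st.2.2)

-- ===== PRECONDITION & SPEC =====
-- Pre_ excludes raise_missing = true: there A either raises KeyError (some key missing on
-- either side) or returns only the diff dict — not a value of the declared triple type.
def Pre_rowdiff (a : List (String × Int)) (b : List (String × Int)) (raise_missing : Bool) : Prop := raise_missing = false
instance (a : List (String × Int)) (b : List (String × Int)) (raise_missing : Bool) : Decidable (Pre_rowdiff a b raise_missing) := by unfold Pre_rowdiff; infer_instance
def pvWitness_rowdiff : (List (String × Int)) × (List (String × Int)) × Bool := ([("x", 1), ("y", 2)], [("y", 3), ("z", 4)], false)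

def Spec_rowdiff (a : List (String × Int)) (b : List (String × Int)) (raise_missing : Bool) (out : (List (String × Int × Int)) × List String × List String) : Prop := out = rowdiff_alt a b raise_missing
instance (a : List (String × Int)) (b : List (String × Int)) (raise_missing : Bool) (out : (List (String × Int × Int)) × List String × List String) : Decidable (Spec_rowdiff a b raise_missing out) := by unfold Spec_rowdiff; infer_instance

-- ===== CLAIM (what is proved, stated in full; the proofs are below) =====
def Claim_equal_rowdiff : Prop := ∀ (a : List (String × Int)) (b : List (String × Int)) (raise_missing : Bool), Dom_rowdiff a b raise_missing → Pre_rowdiff a b raise_missing → Spec_rowdiff a b raise_missing (rowdiff a b raise_missing)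

-- ===== LEMMAS AND PROOFS =====

-- a fold whose step updates the two components independently splits into two folds
theorem pv_foldl_pair_split {α β γ : Type} (f : β → α → β) (g : γ → α → γ)
    (l : List α) (p : β × γ) :
    l.foldl (fun s x => (f s.1 x, g s.2 x)) p = (l.foldl f p.1, l.foldl g p.2) := by
  induction l generalizing p with
  | nil => rfl
  | cons x t ih => simpa using ih (f p.1 x, g p.2 x)

-- A's diff-building loop over fresh distinct keys appends exactly the filtered items
theorem pv_dictFold_items (db : PySem.Dict String Int) (l : List (String × Int))
    (d : PySem.Dict String (Int × Int))
    (hnd : (l.map (·.1)).Nodup) (hf : ∀ kv ∈ l, d.contains kv.1 = false) :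
    (l.foldl
      (fun d kv =>
        if db.contains kv.1 then
          (if db.getD kv.1 0 ≠ kv.2 then d.insert kv.1 (kv.2, db.getD kv.1 0) else d)
        else d) d).items
    = d.items ++ l.filterMap
        (fun kv => if db.contains kv.1 ∧ db.getD kv.1 0 ≠ kv.2
                   then some (kv.1, kv.2, db.getD kv.1 0) else none) := by
  induction l generalizing d with
  | nil => simp
  | cons kv t ih =>
    simp only [List.map_cons, List.nodup_cons] at hnd
    have hfresh : d.contains kv.1 = false := hf kv (List.mem_cons_self ..)
    have hft : ∀ p ∈ t, d.contains p.1 = false := fun p hp => hf p (List.mem_cons_of_mem _ hp)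
    by_cases hc : db.contains kv.1
    · by_cases hne : db.getD kv.1 0 ≠ kv.2
      · have hft' : ∀ p ∈ t, (d.insert kv.1 (kv.2, db.getD kv.1 0)).contains p.1 = false := by
          intro p hp
          rw [PySem.Dict.contains_insert]
          have : ¬ p.1 = kv.1 := by
            intro h; exact hnd.1 (h ▸ List.mem_map_of_mem hp)
          simp [this, hft p hp]
        rw [List.foldl_cons, if_pos hc, if_pos hne, ih _ hnd.2 hft',
          PySem.Dict.items_insert_of_not_contains _ _ hfresh]
        simp [hc, hne]
      · rw [List.foldl_cons, if_pos hc, if_neg hne, ih d hnd.2 hft]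
        simp [hc, hne]
    · rw [List.foldl_cons, if_neg hc, ih d hnd.2 hft]
      simp [hc]

-- A's set-accumulating loops over fresh distinct keys append the filtered keys
theorem pv_setFold (p : String × Int → Bool) (l : List (String × Int)) (s : List String)
    (hnd : (l.map (·.1)).Nodup) (hf : ∀ kv ∈ l, kv.1 ∉ s) :
    l.foldl (fun m kv => if p kv then PySem.Set.add m kv.1 else m) s
    = s ++ (l.filter p).map (·.1) := by
  induction l generalizing s with
  | nil => simp
  | cons kv t ih =>
    simp only [List.map_cons, List.nodup_cons] at hnd
    have hft : ∀ q ∈ t, q.1 ∉ s := fun q hq => hf q (List.mem_cons_of_mem _ hq)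
    by_cases hp : p kv
    · have hadd : PySem.Set.add s kv.1 = s ++ [kv.1] := by
        have hx : kv.1 ∉ s := hf kv (List.mem_cons_self ..)
        simpa [PySem.Set.add, PySem.Set.contains, List.contains_eq_mem] using hx
      have hft' : ∀ q ∈ t, q.1 ∉ s ++ [kv.1] := by
        intro q hq
        simp only [List.mem_append, List.mem_singleton]
        rintro (h | h)
        · exact hft q hq h
        · exact hnd.1 (h ▸ List.mem_map_of_mem hq)
      rw [List.foldl_cons, if_pos hp, hadd, ih _ hnd.2 hft']
      simp [hp]
    · rw [List.foldl_cons, if_neg hp, ih s hnd.2 hft]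
      simp [hp]

-- set(xs) of a duplicate-free list is the list itself
theorem pv_ofList_nodup {l : List String} (h : l.Nodup) : PySem.Set.ofList l = l := by
  suffices H : ∀ (l s : List String), l.Nodup → (∀ x ∈ l, x ∉ s) → l.foldl PySem.Set.add s = s ++ l by
    simpa using H l [] h (by simp)
  intro l
  induction l with
  | nil => simp
  | cons x t ih =>
    intro s hnd hf
    simp only [List.nodup_cons] at hnd
    have hadd : PySem.Set.add s x = s ++ [x] := by
      have hx : x ∉ s := hf x (List.mem_cons_self ..)
      simpa [PySem.Set.add, PySem.Set.contains, List.contains_eq_mem] using hx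
    have hf' : ∀ y ∈ t, y ∉ s ++ [x] := by
      intro y hy
      simp only [List.mem_append, List.mem_singleton]
      rintro (h | h)
      · exact hf y (List.mem_cons_of_mem _ hy) h
      · exact hnd.1 (h ▸ hy)
    rw [List.foldl_cons, hadd, ih _ hnd.2 hf']
    simp

-- dict membership agrees with list membership of the keys
theorem pv_contains_keys (d : PySem.Dict String Int) (k : String) :
    d.contains k = (d.keys).contains k := by
  rw [Bool.eq_iff_iff]
  simp only [PySem.Dict.contains, PySem.Dict.keys, List.contains_eq_mem, List.any_eq_true,
    List.mem_map, beq_iff_eq, decide_eq_true_eq]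

-- erasing one key does not change lookups at other keys
theorem pv_get?_erase_of_ne (p : PySem.Dict String Int) (k k' : String) (h : k' ≠ k) :
    (p.erase k).get? k' = p.get? k' := by
  simp only [PySem.Dict.erase, PySem.Dict.get?]
  congr 1
  induction p.items with
  | nil => rfl
  | cons x t ih =>
    by_cases hx : x.1 = k
    · have h1 : (!(x.1 == k)) = false := by simp [hx]
      rw [List.filter_cons, h1, if_neg (by simp), ih]
      exact (List.find?_cons_of_neg (by simp [hx, Ne.symm h])).symm
    · have h1 : (!(x.1 == k)) = true := by simp [hx]
      rw [List.filter_cons, h1, if_pos rfl]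
      by_cases hx' : x.1 = k'
      · rw [List.find?_cons_of_pos (by simp [hx']), List.find?_cons_of_pos (by simp [hx'])]
      · rw [List.find?_cons_of_neg (by simp [hx']), ih, List.find?_cons_of_neg (by simp [hx'])]

-- B's single loop, characterized: the residual dict keeps exactly the unvisited-key items,
-- diff and bmissing append the filtered items/keys (decided against db via the invariant
-- that pending agrees with db on all unprocessed keys)
theorem pv_bfold (db : PySem.Dict String Int) (l : List (String × Int))
    (p : PySem.Dict String Int) (d : PySem.Dict String (Int × Int)) (s : List String)
    (hnd : (l.map (·.1)).Nodup)
    (hp : ∀ kv ∈ l, p.get? kv.1 = db.get? kv.1)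
    (hd : ∀ kv ∈ l, d.contains kv.1 = false)
    (hs : ∀ kv ∈ l, kv.1 ∉ s) :
    l.foldl
      (fun (st : PySem.Dict String Int × PySem.Dict String (Int × Int) × PySem.Set String) kv =>
        match st.1.pop? kv.1 with
        | some (w, p') =>
            if w ≠ kv.2 then (p', st.2.1.insert kv.1 (kv.2, w), st.2.2) else (p', st.2.1, st.2.2)
        | none => (st.1, st.2.1, PySem.Set.add st.2.2 kv.1))
      (p, d, s)
    = (PySem.Dict.mk (p.items.filter (fun q => !((l.map (·.1)).contains q.1))),
       PySem.Dict.mk (d.items ++ l.filterMap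
         (fun kv => match db.get? kv.1 with
                    | some w => if w ≠ kv.2 then some (kv.1, kv.2, w) else none
                    | none => none)),
       s ++ (l.filter (fun kv => !db.contains kv.1)).map (·.1)) := by
  induction l generalizing p d s with
  | nil => simp
  | cons kv t ih =>
    simp only [List.map_cons, List.nodup_cons] at hnd
    have hpt : ∀ q ∈ t, q.1 ≠ kv.1 := by
      intro q hq h; exact hnd.1 (h ▸ List.mem_map_of_mem hq)
    cases hg : db.get? kv.1 with
    | some w =>
      have hpg : p.get? kv.1 = some w := (hp kv (List.mem_cons_self ..)).trans hg
      have hpop : p.pop? kv.1 = some (w, p.erase kv.1) := by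
        simp [PySem.Dict.pop?, hpg]
      have hp' : ∀ q ∈ t, (p.erase kv.1).get? q.1 = db.get? q.1 := fun q hq =>
        (pv_get?_erase_of_ne p kv.1 q.1 (hpt q hq)).trans (hp q (List.mem_cons_of_mem _ hq))
      have hcont : db.contains kv.1 = true := by
        rw [PySem.Dict.contains_eq_isSome_get?, hg]; rfl
      have hpend : ((p.erase kv.1).items.filter (fun q => !((t.map (·.1)).contains q.1)))
          = p.items.filter (fun q => !(((kv.1 :: t.map (·.1))).contains q.1)) := by
        simp only [PySem.Dict.erase, List.filter_filter]
        apply List.filter_congr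
        intro q _
        simp only [List.contains_cons]
        cases h : (q.1 == kv.1) <;> simp [h]
      by_cases hne : w ≠ kv.2
      · have hd' : ∀ q ∈ t, (d.insert kv.1 (kv.2, w)).contains q.1 = false := by
          intro q hq
          rw [PySem.Dict.contains_insert]
          simp [hpt q hq, hd q (List.mem_cons_of_mem _ hq)]
        rw [List.foldl_cons]
        simp only [hpop, if_pos hne]
        rw [ih (p.erase kv.1) _ s hnd.2 hp' hd' (fun q hq => hs q (List.mem_cons_of_mem _ hq))]
        refine Prod.ext ?_ (Prod.ext ?_ ?_)
        · exact congrArg PySem.Dict.mk hpend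
        · refine congrArg PySem.Dict.mk ?_
          rw [PySem.Dict.items_insert_of_not_contains _ _ (hd kv (List.mem_cons_self ..))]
          simp [hg, hne]
        · simp [hcont]
      · rw [List.foldl_cons]
        simp only [hpop, if_neg hne]
        rw [ih (p.erase kv.1) d s hnd.2 hp'
          (fun q hq => hd q (List.mem_cons_of_mem _ hq))
          (fun q hq => hs q (List.mem_cons_of_mem _ hq))]
        refine Prod.ext (congrArg PySem.Dict.mk hpend) (Prod.ext ?_ ?_)
        · simp [hg, hne]
        · simp [hcont]
    | none =>
      have hpg : p.get? kv.1 = none := (hp kv (List.mem_cons_self ..)).trans hg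
      have hpop : p.pop? kv.1 = none := by simp [PySem.Dict.pop?, hpg]
      have hcont : db.contains kv.1 = false := by
        rw [PySem.Dict.contains_eq_isSome_get?, hg]; rfl
      have hadd : PySem.Set.add s kv.1 = s ++ [kv.1] := by
        have hx : kv.1 ∉ s := hs kv (List.mem_cons_self ..)
        simpa [PySem.Set.add, PySem.Set.contains, List.contains_eq_mem] using hx
      have hs' : ∀ q ∈ t, q.1 ∉ s ++ [kv.1] := by
        intro q hq
        simp only [List.mem_append, List.mem_singleton]
        rintro (h | h)
        · exact hs q (List.mem_cons_of_mem _ hq) h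
        · exact hpt q hq h
      have hfind : p.items.find? (fun q => q.1 == kv.1) = none := by
        simpa [PySem.Dict.get?, Option.map_eq_none_iff] using hpg
      have hnok : ∀ q ∈ p.items, ¬ (q.1 = kv.1) := by
        intro q hq h
        have := List.find?_eq_none.mp hfind q hq
        simp [h] at this
      have hpend : (p.items.filter (fun q => !((t.map (·.1)).contains q.1)))
          = p.items.filter (fun q => !(((kv.1 :: t.map (·.1))).contains q.1)) := by
        apply List.filter_congr
        intro q hq
        have : (q.1 == kv.1) = false := by simp [hnok q hq]
        simp only [List.contains_cons]
        simp [this]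
      rw [List.foldl_cons]
      simp only [hpop, hadd]
      rw [ih p d (s ++ [kv.1]) hnd.2
        (fun q hq => hp q (List.mem_cons_of_mem _ hq))
        (fun q hq => hd q (List.mem_cons_of_mem _ hq)) hs']
      refine Prod.ext (congrArg PySem.Dict.mk hpend) (Prod.ext ?_ ?_)
      · simp [hg]
      · simp [hcont]

-- ===== VERDICT (by name: the statement is the Claim_ definition above) =====
theorem rowdiff_spec : Claim_equal_rowdiff := by
  intro a b rm _ hpre
  unfold Spec_rowdiff Pre_rowdiff at *
  subst hpre
  unfold rowdiff rowdiff_alt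
  simp only []
  set da := PySem.Dict.ofList a with hda
  set db := PySem.Dict.ofList b with hdb
  have hnda : da.keys.Nodup := PySem.Dict.nodup_keys_ofList a
  have hndb : db.keys.Nodup := PySem.Dict.nodup_keys_ofList b
  have hka : (da.items.map (·.1)).Nodup := hnda
  have hkb : (db.items.map (·.1)).Nodup := hndb
  -- characterize B's single loop
  rw [pv_bfold db da.items db PySem.Dict.empty PySem.Set.empty hka (fun _ _ => rfl) (by simp) (by simp [PySem.Set.empty])]
  -- split A's first loop into the dict fold and the set fold
  have hsplit : da.items.foldl
      (fun (st : PySem.Dict String (Int × Int) × PySem.Set String) kv =>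
        if db.contains kv.1 then
          (if db.getD kv.1 0 ≠ kv.2 then (st.1.insert kv.1 (kv.2, db.getD kv.1 0), st.2) else st)
        else (st.1, PySem.Set.add st.2 kv.1))
      (PySem.Dict.empty, PySem.Set.empty)
    = (da.items.foldl
        (fun d kv => if db.contains kv.1 then
            (if db.getD kv.1 0 ≠ kv.2 then PySem.Dict.insert d kv.1 (kv.2, db.getD kv.1 0) else d)
          else d) PySem.Dict.empty,
       da.items.foldl
        (fun m kv => if !(db.contains kv.1) then PySem.Set.add m kv.1 else m) PySem.Set.empty) := by
    rw [show (fun (st : PySem.Dict String (Int × Int) × PySem.Set String) (kv : String × Int) =>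
          if db.contains kv.1 then
            (if db.getD kv.1 0 ≠ kv.2 then (st.1.insert kv.1 (kv.2, db.getD kv.1 0), st.2) else st)
          else (st.1, PySem.Set.add st.2 kv.1))
        = (fun st kv =>
            ((fun d kv => if db.contains kv.1 then
                (if db.getD kv.1 0 ≠ kv.2 then PySem.Dict.insert d kv.1 (kv.2, db.getD kv.1 0) else d)
              else d) st.1 kv,
             (fun m kv => if !(db.contains kv.1) then PySem.Set.add m kv.1 else m) st.2 kv)) from by
        funext st kv; by_cases hc : db.contains kv.1 <;> simp [hc] <;> split_ifs <;> rfl]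
    exact pv_foldl_pair_split
      (fun d kv => if db.contains kv.1 then
          (if db.getD kv.1 0 ≠ kv.2 then PySem.Dict.insert d kv.1 (kv.2, db.getD kv.1 0) else d)
        else d)
      (fun m kv => if !(db.contains kv.1) then PySem.Set.add m kv.1 else m)
      da.items (PySem.Dict.empty, PySem.Set.empty)
  rw [hsplit]
  refine Prod.ext ?_ (Prod.ext ?_ ?_)
  · -- diff
    rw [pv_dictFold_items db da.items PySem.Dict.empty hka (by simp)]
    simp only [PySem.Dict.empty, List.nil_append]
    apply List.filterMap_congr
    intro kv _
    cases h : db.get? kv.1 with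
    | none =>
      have hc : db.contains kv.1 = false := by
        rw [PySem.Dict.contains_eq_isSome_get?, h]; rfl
      simp [hc]
    | some bv =>
      have hc : db.contains kv.1 = true := by
        rw [PySem.Dict.contains_eq_isSome_get?, h]; rfl
      have hbd : db.getD kv.1 0 = bv := PySem.Dict.getD_of_get?_eq_some db 0 h
      by_cases hne : bv = kv.2 <;> simp [hc, hbd, hne]
  · -- amissing: A's filter over b's items vs B's residual pending keys
    rw [pv_setFold (fun kv => !(da.contains kv.1)) db.items PySem.Set.empty hkb (by simp [PySem.Set.empty])]
    have hres : (db.items.filter (fun q => !((da.items.map (·.1)).contains q.1))).map (·.1)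
        = (db.items.filter (fun kv => !(da.contains kv.1))).map (·.1) := by
      apply congrArg (List.map _)
      apply List.filter_congr
      intro kv _
      rw [pv_contains_keys da kv.1]
      rfl
    have hnd' : ((db.items.filter (fun q => !((da.items.map (·.1)).contains q.1))).map (·.1)).Nodup := by
      exact hkb.sublist (List.Sublist.map _ List.filter_sublist)
    simp only [PySem.Dict.keys]
    rw [pv_ofList_nodup hnd', hres]
    simp [PySem.Set.empty]
  · -- bmissing
    rw [show (fun (m : PySem.Set String) (kv : String × Int) =>
          if !(db.contains kv.1) then PySem.Set.add m kv.1 else m)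
        = (fun m kv => if (fun kv : String × Int => !(db.contains kv.1)) kv then PySem.Set.add m kv.1 else m) from rfl,
      pv_setFold _ da.items PySem.Set.empty hka (by simp [PySem.Set.empty])]
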